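-- pv_equiv track=rewrite | github.com/fpkgvip/mariana-computer | mariana/tools/video_gen.py | _coerce_size
-- ===== SOURCE A (Python) =====
-- _AVALANCHE_VEO_SIZES: frozenset[str] = frozenset(
--     {"1920x1080", "1080x1920", "3840x2160", "2160x3840"}
-- )
--
-- _VERTEX_VEO_SIZES: frozenset[str] = frozenset(
--     {"1280x720", "720x1280", "1920x1080", "1080x1920", "3840x2160", "2160x3840"}
-- )
--
-- def _model_provider(model_id: str) -> str:
--     """Extract the provider prefix (``avalanche``, ``google-vertex`` …) if any."""
--     model_id = (model_id or "").strip()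
--     if "/" in model_id:
--         return model_id.split("/", 1)[0].lower()
--     return ""
--
-- def _allowed_sizes(model_id: str) -> frozenset[str] | None:
--     """Return the legal size set for *model_id*, or ``None`` if unknown (no check)."""
--     prov = _model_provider(model_id)
--     if prov == "avalanche":
--         return _AVALANCHE_VEO_SIZES
--     if prov in ("google-vertex", "google", "vertex"):
--         return _VERTEX_VEO_SIZES
--     return None
--
-- def _coerce_size(size: str, model_id: str) -> str:
--     """Return a size the model accepts.
--
--     If *size* is not in the model's allowed set, pick the first allowed size
--     that shares the same orientation (landscape/portrait); otherwise fall back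
--     to the first allowed size.  Unknown model → return *size* unchanged.
--     """
--     allowed = _allowed_sizes(model_id)
--     if allowed is None:
--         return size
--     size = (size or "").strip()
--     if size in allowed:
--         return size
--     # Determine orientation of requested size if parseable.
--     orientation: str | None = None
--     try:
--         w, h = (int(x) for x in size.lower().split("x", 1))
--         orientation = "portrait" if h > w else "landscape"
--     except Exception:
--         orientation = None
--     def _area(s: str) -> int:
--         try:
--             w, h = (int(x) for x in s.split("x", 1))
--             return w * h
--         except Exception:
--             return 0
--
--     if orientation:
--         matches: list[str] = []
--         for cand in allowed:
--             try:
--                 cw, ch = (int(x) for x in cand.split("x", 1))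
--             except Exception:
--                 continue
--             cand_orient = "portrait" if ch > cw else "landscape"
--             if cand_orient == orientation:
--                 matches.append(cand)
--         if matches:
--             # Prefer the smallest area match of the right orientation — cheapest
--             # and closest to a "default" user asking for ~720p / 1080p.
--             return min(matches, key=_area)
--     # Pick the smallest landscape (16:9) as final default.
--     for cand in ("1920x1080", "1280x720"):
--         if cand in allowed:
--             return cand
--     return min(allowed, key=_area)
-- ===== SOURCE B (Python) =====
-- # Table-driven rewrite: per-provider (allowed set, smallest landscape, smallest
-- # portrait) precomputed once, so no candidate scan / min-by-area at call time.
--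
-- _VERTEX = frozenset({"1280x720", "720x1280", "1920x1080", "1080x1920", "3840x2160", "2160x3840"})
-- _AVALANCHE = frozenset({"1920x1080", "1080x1920", "3840x2160", "2160x3840"})
--
-- _TABLE = {
--     "avalanche": (_AVALANCHE, "1920x1080", "1080x1920"),
--     "google-vertex": (_VERTEX, "1280x720", "720x1280"),
--     "google": (_VERTEX, "1280x720", "720x1280"),
--     "vertex": (_VERTEX, "1280x720", "720x1280"),
-- }
--
--
-- def _parse_orientation(size: str):
--     try:
--         w, h = (int(x) for x in size.lower().split("x", 1))
--     except Exception:
--         return None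
--     return "portrait" if h > w else "landscape"
--
--
-- def _provider(model_id: str) -> str:
--     m = (model_id or "").strip()
--     return m.split("/", 1)[0].lower() if "/" in m else ""
--
--
-- def _coerce_size(size: str, model_id: str) -> str:
--     entry = _TABLE.get(_provider(model_id))
--     if entry is None:
--         return size
--     allowed, land, port = entry
--     size = (size or "").strip()
--     if size in allowed:
--         return size
--     o = _parse_orientation(size)
--     if o == "portrait":
--         return port
--     if o == "landscape":
--         return land
--     return "1920x1080"
-- ===== Notes on version B (the rewrite author's own statement) =====
-- stated objective: simpler
-- what changed: A scans the allowed set per call, classifies every candidate's orientation and takes min-by-area (plus a tuple fallback loop); B precomputes one table mapping each provider to (allowed set, smallest landscape, smallest portrait) and answers with a single dict lookup and an orientation test, no candidate scan or min at call time.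
import Mathlib
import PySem

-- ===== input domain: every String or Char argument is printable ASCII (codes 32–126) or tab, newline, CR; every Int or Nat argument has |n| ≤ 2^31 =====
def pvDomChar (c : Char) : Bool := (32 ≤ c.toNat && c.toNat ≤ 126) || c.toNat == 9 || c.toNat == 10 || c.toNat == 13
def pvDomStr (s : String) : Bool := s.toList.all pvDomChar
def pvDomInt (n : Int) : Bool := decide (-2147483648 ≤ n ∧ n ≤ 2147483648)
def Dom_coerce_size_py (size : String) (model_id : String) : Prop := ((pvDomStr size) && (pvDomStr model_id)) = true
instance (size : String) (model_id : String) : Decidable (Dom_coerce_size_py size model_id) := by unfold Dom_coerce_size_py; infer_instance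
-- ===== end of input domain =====

-- B replaces A's per-call candidate scan and min-by-area by a precomputed per-provider
-- table (allowed set, smallest landscape, smallest portrait): simpler.

-- ===== PORT A =====

def pvAvalancheSizes : List String := ["1920x1080", "1080x1920", "3840x2160", "2160x3840"]

def pvVertexSizes : List String :=
  ["1280x720", "720x1280", "1920x1080", "1080x1920", "3840x2160", "2160x3840"]

-- _model_provider
def pvModelProvider (model_id : String) : String :=
  let m := PySem.Str.strip (if model_id = "" then "" else model_id)
  if PySem.Str.isIn "/" m then
    PySem.Str.lower (((PySem.Str.splitMax? m "/" 1).getD []).headD "")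
  else ""

-- _allowed_sizes
def pvAllowedSizes (model_id : String) : Option (List String) :=
  let prov := pvModelProvider model_id
  if prov = "avalanche" then some pvAvalancheSizes
  else if prov = "google-vertex" ∨ prov = "google" ∨ prov = "vertex" then some pvVertexSizes
  else none

-- `w, h = (int(x) for x in s.split("x", 1))`: none exactly where Python raises
def pvParse2 (s : String) : Option (Int × Int) :=
  match (PySem.Str.splitMax? s "x" 1).getD [] with
  | [a, b] =>
    match PySem.Int.ofStr? a, PySem.Int.ofStr? b with
    | some w, some h => some (w, h)
    | _, _ => none
  | _ => none

-- _area (try/except returning 0)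
def pvArea (s : String) : Int :=
  match pvParse2 s with
  | some (w, h) => w * h
  | none => 0

-- the trailing `for cand in ("1920x1080","1280x720") …` loop and final `min(allowed, key=_area)`
-- (allowed is never [] here, so min's ValueError is unreachable; minD's default "" is dead code)
def pvFallback (allowed : List String) : String :=
  if "1920x1080" ∈ allowed then "1920x1080"
  else if "1280x720" ∈ allowed then "1280x720"
  else PySem.List.minD allowed pvArea ""

def coerce_size_py (size : String) (model_id : String) : String :=
  match pvAllowedSizes model_id with
  | none => size
  | some allowed =>
    let size := PySem.Str.strip (if size = "" then "" else size)
    if size ∈ allowed then size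
    else
      let orientation : Option String :=
        match pvParse2 (PySem.Str.lower size) with
        | some (w, h) => some (if h > w then "portrait" else "landscape")
        | none => none
      match orientation with
      | some o =>
        let mtchs : List String := allowed.foldl (fun acc cand =>
          match pvParse2 cand with
          | none => acc
          | some (cw, ch) =>
            if (if ch > cw then "portrait" else "landscape") = o then acc ++ [cand] else acc) []
        if mtchs ≠ [] then PySem.List.minD mtchs pvArea "" else pvFallback allowed
      | none => pvFallback allowed

-- ===== PORT B =====

def pvVertexSet : List String :=
  ["1280x720", "720x1280", "1920x1080", "1080x1920", "3840x2160", "2160x3840"]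

def pvAvalancheSet : List String := ["1920x1080", "1080x1920", "3840x2160", "2160x3840"]

def pvTable : PySem.Dict String (List String × String × String) :=
  PySem.Dict.ofList
    [("avalanche", (pvAvalancheSet, "1920x1080", "1080x1920")),
     ("google-vertex", (pvVertexSet, "1280x720", "720x1280")),
     ("google", (pvVertexSet, "1280x720", "720x1280")),
     ("vertex", (pvVertexSet, "1280x720", "720x1280"))]

-- _parse_orientation
def pvParseOrientation (size : String) : Option String :=
  match (PySem.Str.splitMax? (PySem.Str.lower size) "x" 1).getD [] with
  | [a, b] =>
    match PySem.Int.ofStr? a, PySem.Int.ofStr? b with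
    | some w, some h => some (if h > w then "portrait" else "landscape")
    | _, _ => none
  | _ => none

def pvProvider (model_id : String) : String :=
  let m := PySem.Str.strip (if model_id = "" then "" else model_id)
  if PySem.Str.isIn "/" m then
    PySem.Str.lower (((PySem.Str.splitMax? m "/" 1).getD []).headD "")
  else ""

def coerce_size_py_alt (size : String) (model_id : String) : String :=
  match pvTable.get? (pvProvider model_id) with
  | none => size
  | some (allowed, land, port) =>
    let size := PySem.Str.strip (if size = "" then "" else size)
    if size ∈ allowed then size
    else
      match pvParseOrientation size with
      | some o => if o = "portrait" then port else if o = "landscape" then land else "1920x1080"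
      | none => "1920x1080"

-- ===== PRECONDITION & SPEC =====
def Spec_coerce_size_py (size : String) (model_id : String) (out : String) : Prop := out = coerce_size_py_alt size model_id
instance (size : String) (model_id : String) (out : String) : Decidable (Spec_coerce_size_py size model_id out) := by unfold Spec_coerce_size_py; infer_instance

-- ===== CLAIM (what is proved, stated in full; the proofs are below) =====
def Claim_equal_coerce_size_py : Prop := ∀ (size : String) (model_id : String), Dom_coerce_size_py size model_id → Spec_coerce_size_py size model_id (coerce_size_py size model_id)

-- ===== LEMMAS AND PROOFS =====

-- proof-side views of the two ports: the code after the provider row has been resolved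
def pvACore (size : String) (allowed : List String) : String :=
  let size := PySem.Str.strip (if size = "" then "" else size)
  if size ∈ allowed then size
  else
    let orientation : Option String :=
      match pvParse2 (PySem.Str.lower size) with
      | some (w, h) => some (if h > w then "portrait" else "landscape")
      | none => none
    match orientation with
    | some o =>
      let mtchs : List String := allowed.foldl (fun acc cand =>
        match pvParse2 cand with
        | none => acc
        | some (cw, ch) =>
          if (if ch > cw then "portrait" else "landscape") = o then acc ++ [cand] else acc) []
      if mtchs ≠ [] then PySem.List.minD mtchs pvArea "" else pvFallback allowed
    | none => pvFallback allowed

def pvBCore (size : String) : Option (List String × String × String) → String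
  | none => size
  | some (allowed, land, port) =>
    let size := PySem.Str.strip (if size = "" then "" else size)
    if size ∈ allowed then size
    else
      match pvParseOrientation size with
      | some o => if o = "portrait" then port else if o = "landscape" then land else "1920x1080"
      | none => "1920x1080"

theorem pvA_split (size model_id : String) :
    coerce_size_py size model_id =
      match pvAllowedSizes model_id with
      | none => size
      | some allowed => pvACore size allowed := by
  unfold coerce_size_py pvACore
  rcases h : pvAllowedSizes model_id with _ | L <;> rfl

theorem pvB_split (size model_id : String) :
    coerce_size_py_alt size model_id = pvBCore size (pvTable.get? (pvProvider model_id)) := by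
  unfold coerce_size_py_alt pvBCore
  rcases pvTable.get? (pvProvider model_id) with _ | ⟨L, l, p⟩ <;> rfl

theorem pvProvider_eq (m : String) : pvProvider m = pvModelProvider m := rfl

-- A's inline orientation computation equals B's _parse_orientation helper
theorem pvOrient_eq (s : String) :
    (match pvParse2 (PySem.Str.lower s) with
     | some (w, h) => some (if h > w then "portrait" else "landscape")
     | none => none) = pvParseOrientation s := by
  unfold pvParse2 pvParseOrientation
  rcases h : (PySem.Str.splitMax? (PySem.Str.lower s) "x" 1).getD [] with _ | ⟨a, _ | ⟨b, _ | ⟨c, l⟩⟩⟩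
  · rfl
  · rfl
  · rcases ha : PySem.Int.ofStr? a with _ | w <;> rcases hb : PySem.Int.ofStr? b with _ | hh <;>
      simp [ha, hb]
  · rfl

-- orientation, when defined, is one of the two literals
theorem pvOrient_cases (s o : String) (h : pvParseOrientation s = some o) :
    o = "portrait" ∨ o = "landscape" := by
  unfold pvParseOrientation at h
  rcases hs : (PySem.Str.splitMax? (PySem.Str.lower s) "x" 1).getD [] with _ | ⟨a, _ | ⟨b, _ | ⟨c, l⟩⟩⟩ <;>
    rw [hs] at h <;> simp at h
  rcases ha : PySem.Int.ofStr? a with _ | w <;> rcases hb : PySem.Int.ofStr? b with _ | hh <;>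
    rw [ha, hb] at h <;> simp at h
  rw [← h]
  split <;> simp

-- pvBCore applied to each concrete table row / to no row, by iota-reduction
theorem pvB_row (s : String) (allowed : List String) (land port : String) :
    pvBCore s (some (allowed, land, port)) =
      (if PySem.Str.strip (if s = "" then "" else s) ∈ allowed then
        PySem.Str.strip (if s = "" then "" else s)
      else
        match pvParseOrientation (PySem.Str.strip (if s = "" then "" else s)) with
        | some o => if o = "portrait" then port else if o = "landscape" then land else "1920x1080"
        | none => "1920x1080") := rfl

theorem pvB_none (s : String) : pvBCore s none = s := rfl

theorem pvAva (s : String) : pvACore s pvAvalancheSizes = pvBCore s (some (pvAvalancheSet, "1920x1080", "1080x1920")) := by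
  rw [pvB_row]
  unfold pvACore
  by_cases hm : PySem.Str.strip (if s = "" then "" else s) ∈ pvAvalancheSizes
  · rw [if_pos hm, if_pos (show PySem.Str.strip (if s = "" then "" else s) ∈ pvAvalancheSet from hm)]
  · rw [if_neg hm, if_neg (show ¬ PySem.Str.strip (if s = "" then "" else s) ∈ pvAvalancheSet from hm)]
    rw [pvOrient_eq]
    rcases ho : pvParseOrientation (PySem.Str.strip (if s = "" then "" else s)) with _ | o
    · decide
    · rcases pvOrient_cases _ o ho with rfl | rfl <;> decide

theorem pvVtx (s : String) : pvACore s pvVertexSizes = pvBCore s (some (pvVertexSet, "1280x720", "720x1280")) := by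
  rw [pvB_row]
  unfold pvACore
  by_cases hm : PySem.Str.strip (if s = "" then "" else s) ∈ pvVertexSizes
  · rw [if_pos hm, if_pos (show PySem.Str.strip (if s = "" then "" else s) ∈ pvVertexSet from hm)]
  · rw [if_neg hm, if_neg (show ¬ PySem.Str.strip (if s = "" then "" else s) ∈ pvVertexSet from hm)]
    rw [pvOrient_eq]
    rcases ho : pvParseOrientation (PySem.Str.strip (if s = "" then "" else s)) with _ | o
    · decide
    · rcases pvOrient_cases _ o ho with rfl | rfl <;> decide

theorem pvGetNone (p : String) (h1 : p ≠ "avalanche") (h2 : p ≠ "google-vertex")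
    (h3 : p ≠ "google") (h4 : p ≠ "vertex") : pvTable.get? p = none := by
  have hmk : pvTable = PySem.Dict.mk
      [("avalanche", (pvAvalancheSet, "1920x1080", "1080x1920")),
       ("google-vertex", (pvVertexSet, "1280x720", "720x1280")),
       ("google", (pvVertexSet, "1280x720", "720x1280")),
       ("vertex", (pvVertexSet, "1280x720", "720x1280"))] := by decide
  rw [hmk, PySem.Dict.get?_mk_cons, PySem.Dict.get?_mk_cons, PySem.Dict.get?_mk_cons,
    PySem.Dict.get?_mk_cons]
  simp [Ne.symm h1, Ne.symm h2, Ne.symm h3, Ne.symm h4, PySem.Dict.get?]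

theorem pvGetAva : pvTable.get? "avalanche" = some (pvAvalancheSet, "1920x1080", "1080x1920") := by decide

theorem pvGetVtx (p : String) (hp : p = "google-vertex" ∨ p = "google" ∨ p = "vertex") :
    pvTable.get? p = some (pvVertexSet, "1280x720", "720x1280") := by
  rcases hp with rfl | rfl | rfl <;> decide

-- ===== VERDICT (by name: the statement is the Claim_ definition above) =====
theorem coerce_size_py_spec : Claim_equal_coerce_size_py := by
  intro size model_id _
  unfold Spec_coerce_size_py
  rw [pvA_split, pvB_split, pvProvider_eq]
  unfold pvAllowedSizes
  by_cases h1 : pvModelProvider model_id = "avalanche"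
  · rw [h1, if_pos rfl, pvGetAva]
    exact pvAva size
  · by_cases h2 : pvModelProvider model_id = "google-vertex" ∨
        pvModelProvider model_id = "google" ∨ pvModelProvider model_id = "vertex"
    · rw [if_neg h1, if_pos h2, pvGetVtx _ h2]
      exact pvVtx size
    · rw [if_neg h1, if_neg h2,
        pvGetNone _ h1 (fun h => h2 (Or.inl h)) (fun h => h2 (Or.inr (Or.inl h)))
          (fun h => h2 (Or.inr (Or.inr h))), pvB_none]
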